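-- pv_equiv track=rewrite | github.com/harper493/epidemia | utility.py | camel_to_title
-- ===== SOURCE A (Python) =====
-- def camel_to_title(text) :
--     result = ''
--     prev_upper = True
--     for c in text :
--         if c.isupper() :
--             if not prev_upper :
--                 prev_upper = True
--                 result += ' '
--         else :
--             prev_upper = False
--         result += c
--     return result
-- ===== SOURCE B (Python) =====
-- def camel_to_title(text):
--     return text[:1] + ''.join(
--         (' ' + c) if (c.isupper() and not p.isupper()) else c
--         for p, c in zip(text, text[1:])
--     )
-- ===== Notes on version B (the rewrite author's own statement) =====
-- stated objective: idiomatic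
-- what changed: B replaces A's stateful character scan (prev_upper flag, growing accumulator string) with a stateless pairwise formulation: zip the string with its own tail and join, per adjacent pair, a space plus the character when an uppercase follows a non-uppercase, prefixed by the first character.
import Mathlib
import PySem

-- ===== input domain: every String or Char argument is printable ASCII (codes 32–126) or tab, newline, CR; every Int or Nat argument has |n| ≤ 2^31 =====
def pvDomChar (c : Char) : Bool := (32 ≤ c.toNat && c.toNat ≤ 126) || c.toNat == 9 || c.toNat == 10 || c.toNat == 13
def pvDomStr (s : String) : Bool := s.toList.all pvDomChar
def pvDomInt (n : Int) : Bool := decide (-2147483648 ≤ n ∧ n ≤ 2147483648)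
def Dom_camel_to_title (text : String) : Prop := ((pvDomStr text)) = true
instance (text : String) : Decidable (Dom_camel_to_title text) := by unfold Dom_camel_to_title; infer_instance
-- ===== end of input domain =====

-- B restates A's stateful prev_upper scan as a stateless pairwise formulation (zip with the
-- tail, join per-pair emissions); same O(n) cost, same return value.

-- ===== PORT A =====
-- loop of A: state (result, prev_upper), one step per character
def camelA : List Char → List Char → Bool → List Char
  | [], result, _ => result
  | c :: cs, result, prev_upper =>
    if PySem.Chars.isupper c then
      if !prev_upper then camelA cs ((result ++ [' ']) ++ [c]) true
      else camelA cs (result ++ [c]) true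
    else camelA cs (result ++ [c]) false

def camel_to_title (text : String) : String :=
  String.mk (camelA text.toList [] true)

-- ===== PORT B =====
-- the per-pair emission of Source B's comprehension: (p, c) ↦ ' '+c at a non-upper→upper pair, else c
def emitPair (pc : Char × Char) : List Char :=
  if PySem.Chars.isupper pc.2 && !(PySem.Chars.isupper pc.1) then [' ', pc.2] else [pc.2]

-- text[:1] + ''.join(emission for p, c in zip(text, text[1:]))
def camel_to_title_alt (text : String) : String :=
  String.mk (text.toList.take 1 ++ (text.toList.zip (text.toList.drop 1)).flatMap emitPair)

-- ===== PRECONDITION & SPEC =====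
def Spec_camel_to_title (text : String) (out : String) : Prop := out = camel_to_title_alt text
instance (text : String) (out : String) : Decidable (Spec_camel_to_title text out) := by unfold Spec_camel_to_title; infer_instance

-- ===== CLAIM (what is proved, stated in full; the proofs are below) =====
def Claim_equal_camel_to_title : Prop := ∀ (text : String), Dom_camel_to_title text → Spec_camel_to_title text (camel_to_title text)

-- ===== LEMMAS AND PROOFS =====

-- A's scan, once past the first character, equals the flatMap over adjacent pairs:
-- the Boolean state is exactly "the previous character is uppercase".
theorem camelA_eq_pairs (cs : List Char) : ∀ (prev : Char) (res : List Char),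
    camelA cs res (PySem.Chars.isupper prev) =
      res ++ (List.zip (prev :: cs) cs).flatMap emitPair := by
  induction cs with
  | nil => intro prev res; simp [camelA]
  | cons c cs ih =>
    intro prev res
    simp only [List.zip_cons_cons, List.flatMap_cons]
    by_cases hc : PySem.Chars.isupper c = true
    · by_cases hp : PySem.Chars.isupper prev = true
      · simp only [camelA, hc, hp, Bool.not_true, if_true, emitPair, Bool.and_false,
          Bool.false_eq_true, if_false]
        rw [← hc, ih c]; simp
      · simp only [Bool.not_eq_true] at hp
        simp only [camelA, hc, hp, Bool.not_false, if_true, emitPair, Bool.and_true,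
          if_true]
        rw [← hc, ih c]; simp
    · simp only [Bool.not_eq_true] at hc
      simp only [camelA, hc, Bool.false_eq_true, if_false, emitPair, Bool.false_and]
      rw [← hc, ih c]; simp

-- ===== VERDICT (by name: the statement is the Claim_ definition above) =====
theorem camel_to_title_spec : Claim_equal_camel_to_title := by
  intro text _
  unfold Spec_camel_to_title camel_to_title camel_to_title_alt
  cases h : text.toList with
  | nil => simp [camelA]
  | cons c cs =>
    have hstep : camelA (c :: cs) [] true = camelA cs [c] (PySem.Chars.isupper c) := by
      by_cases hc : PySem.Chars.isupper c = true <;>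
        simp [camelA, hc]
    rw [hstep, camelA_eq_pairs cs c [c]]
    simp
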